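-- pv_equiv track=rewrite | github.com/akikowork/DeepDanbooru | Tagger_unit_test.py | format_url
-- ===== SOURCE A (Python) =====
-- def format_url(fileurl):
--     tmpchr=""
--     tmpchrs=""
--     for chars in fileurl:
--             if chars == '/':
--                     tmpchr = ""
--             else:
--                     tmpchr+=chars
--     for chars in tmpchr:
--             if chars != '_':
--                     tmpchrs+=chars
--             else:
--                     break
--     return tmpchrs
-- ===== SOURCE B (Python) =====
-- def format_url(fileurl):
--     tail = fileurl[fileurl.rfind('/') + 1:]
--     cut = tail.find('_')
--     return tail if cut == -1 else tail[:cut]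
-- ===== Notes on version B (the rewrite author's own statement) =====
-- stated objective: faster
-- what changed: Replaces A's two forward character-accumulation loops (reset on the slash, break at the underscore) by index arithmetic: a backward rfind plus slice for the tail, then a find plus slice for the prefix.
import Mathlib
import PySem

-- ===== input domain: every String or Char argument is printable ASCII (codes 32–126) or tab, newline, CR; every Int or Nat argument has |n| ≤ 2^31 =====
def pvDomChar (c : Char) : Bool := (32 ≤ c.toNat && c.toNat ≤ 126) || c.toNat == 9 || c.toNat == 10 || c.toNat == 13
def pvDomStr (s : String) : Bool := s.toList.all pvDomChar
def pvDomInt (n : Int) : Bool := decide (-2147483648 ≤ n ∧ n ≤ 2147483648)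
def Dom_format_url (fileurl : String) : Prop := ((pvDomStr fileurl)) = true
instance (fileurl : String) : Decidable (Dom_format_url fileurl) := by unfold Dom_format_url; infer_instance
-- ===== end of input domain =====

-- B replaces A's two forward accumulation loops (reset on '/', break on '_') by rfind/find index arithmetic with slices; same O(n) cost, more idiomatic.


-- ===== PORT A =====
-- second loop of A: append chars until '_' (break), carrying the accumulator tmpchrs
def fmtLoop2 (acc : List Char) : List Char → List Char
  | [] => acc
  | c :: rest => if c ≠ '_' then fmtLoop2 (acc ++ [c]) rest else acc

def format_url (fileurl : String) : String :=
  let tmpchr := fileurl.toList.foldl (fun acc c => if c = '/' then [] else acc ++ [c]) ([] : List Char)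
  let tmpchrs := fmtLoop2 [] tmpchr
  String.ofList tmpchrs

-- ===== PORT B =====
def format_url_alt (fileurl : String) : String :=
  let s := fileurl.toList
  let tail := PySem.Chars.slice s (some (PySem.Chars.rfind s ['/'] + 1)) none
  let cut := PySem.Chars.find tail ['_']
  if cut = -1 then String.ofList tail else String.ofList (PySem.Chars.slice tail none (some cut))

-- ===== PRECONDITION & SPEC =====
def Spec_format_url (fileurl : String) (out : String) : Prop := out = format_url_alt fileurl
instance (fileurl : String) (out : String) : Decidable (Spec_format_url fileurl out) := by unfold Spec_format_url; infer_instance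

-- ===== CLAIM (what is proved, stated in full; the proofs are below) =====
def Claim_equal_format_url : Prop := ∀ (fileurl : String), Dom_format_url fileurl → Spec_format_url fileurl (format_url fileurl)

-- ===== LEMMAS AND PROOFS =====

-- single-char isPrefixOf only looks at the head
theorem single_isPrefixOf_append {c0 c : Char} (l : List Char) (hc : c ≠ c0) :
    [c0].isPrefixOf (l ++ [c]) = [c0].isPrefixOf l := by
  cases l with
  | nil => simp [List.isPrefixOf, Ne.symm hc]
  | cons x rest => simp [List.isPrefixOf]

theorem single_prefix_iff (a : Char) (l : List Char) : [a] <+: l ↔ l.head? = some a := by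
  cases l with
  | nil => simp
  | cons x rest =>
    constructor
    · rintro ⟨t, ht⟩; simp at ht; simp [ht.1]
    · intro h; simp at h; exact ⟨rest, by simp [h]⟩

theorem go_zero (s sub : List Char) :
    PySem.Chars.rfind.go s sub 0 = if sub.isPrefixOf s then 0 else -1 := by
  conv_lhs => unfold PySem.Chars.rfind.go

theorem go_succ (s sub : List Char) (m : Nat) :
    PySem.Chars.rfind.go s sub (m+1)
      = if sub.isPrefixOf (s.drop (m+1)) then ((m+1 : Nat) : Int)
        else PySem.Chars.rfind.go s sub m := by
  conv_lhs => unfold PySem.Chars.rfind.go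

theorem go_le (sub : List Char) : ∀ (j : Nat) (s : List Char),
    -1 ≤ PySem.Chars.rfind.go s sub j ∧ PySem.Chars.rfind.go s sub j ≤ (j : Int) := by
  intro j
  induction j with
  | zero => intro s; rw [go_zero]; split <;> simp
  | succ m ih =>
    intro s
    rw [go_succ]
    split
    · push_cast; omega
    · have := ih s; push_cast; omega

theorem go_append (c : Char) (hc : c ≠ '/') : ∀ (j : Nat) (s : List Char), j ≤ s.length →
    PySem.Chars.rfind.go (s ++ [c]) ['/'] j = PySem.Chars.rfind.go s ['/'] j := by
  intro j
  induction j with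
  | zero =>
    intro s _
    rw [go_zero, go_zero, single_isPrefixOf_append s hc]
  | succ m ih =>
    intro s hle
    rw [go_succ, go_succ, List.drop_append_of_le_length hle,
        single_isPrefixOf_append _ hc, ih s (by omega)]

theorem rfind_slash_bounds (s : List Char) :
    -1 ≤ PySem.Chars.rfind s ['/'] ∧ PySem.Chars.rfind s ['/'] + 1 ≤ (s.length : Int) := by
  unfold PySem.Chars.rfind
  cases hn : s.length with
  | zero =>
    have hs : s = [] := List.length_eq_zero_iff.mp hn
    subst hs; rw [go_zero]; simp [List.isPrefixOf]
  | succ m =>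
    rw [go_succ]
    have hd : s.drop (m+1) = [] := List.drop_eq_nil_of_le (by omega)
    rw [hd]
    have := go_le ['/'] m s
    simp only [List.isPrefixOf]
    push_cast; omega

theorem go_append_slash (s : List Char) :
    PySem.Chars.rfind.go (s ++ ['/']) ['/'] s.length = (s.length : Int) := by
  cases hn : s.length with
  | zero =>
    have hs : s = [] := List.length_eq_zero_iff.mp hn
    subst hs; rw [go_zero]; simp [List.isPrefixOf]
  | succ m =>
    rw [go_succ]
    have hd : (s ++ ['/']).drop (m+1) = s.drop (m+1) ++ ['/'] :=
      List.drop_append_of_le_length (by omega)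
    have hd2 : s.drop (m+1) = [] := List.drop_eq_nil_of_le (by omega)
    rw [hd, hd2]
    simp [List.isPrefixOf]

-- core: the reset-fold computes the slice after the last '/'
theorem resetFold_eq_slice (s : List Char) :
    s.foldl (fun acc c => if c = '/' then [] else acc ++ [c]) ([] : List Char)
      = PySem.Chars.slice s (some (PySem.Chars.rfind s ['/'] + 1)) none := by
  induction s using List.reverseRecOn with
  | nil => decide
  | append_singleton s c ih =>
    rw [List.foldl_append]
    simp only [List.foldl_cons, List.foldl_nil]
    have hr : PySem.Chars.rfind (s ++ [c]) ['/']
        = if c = '/' then (s.length : Int) else PySem.Chars.rfind s ['/'] := by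
      unfold PySem.Chars.rfind
      rw [List.length_append, List.length_cons, List.length_nil]
      rw [go_succ]
      have hd : (s ++ [c]).drop (s.length + 1) = [] := List.drop_eq_nil_of_le (by simp)
      rw [hd]
      simp only [List.isPrefixOf]
      by_cases hc : c = '/'
      · subst hc
        have := go_append_slash s
        simpa using this
      · rw [if_neg hc, go_append c hc s.length s (le_refl _)]
        rfl
    rw [hr]
    by_cases hc : c = '/'
    · subst hc
      rw [if_pos rfl, if_pos rfl]
      simp only [PySem.Chars.slice_eq_listSlice]
      rw [PySem.List.slice_from _ (by omega)]
      symm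
      apply List.drop_eq_nil_of_le
      simp
    · rw [if_neg hc, if_neg hc]
      obtain ⟨h1, h2⟩ := rfind_slash_bounds s
      simp only [PySem.Chars.slice_eq_listSlice] at *
      rw [PySem.List.slice_from (s ++ [c]) (by omega), PySem.List.slice_from s (by omega)] at *
      rw [List.drop_append_of_le_length (by omega : (PySem.Chars.rfind s ['/'] + 1).toNat ≤ s.length)]
      rw [ih]

-- the break loop is takeWhile
theorem fmtLoop2_eq_takeWhile (l acc : List Char) :
    fmtLoop2 acc l = acc ++ l.takeWhile (fun c => decide (c ≠ '_')) := by
  induction l generalizing acc with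
  | nil => simp [fmtLoop2]
  | cons c rest ih =>
    by_cases h : c = '_'
    · simp [fmtLoop2, h]
    · simp [fmtLoop2, h, ih]

theorem takeWhile_eq_take (l : List Char) (m : Nat)
    (h1 : ∀ i < m, ¬ ['_'] <+: l.drop i) (h2 : ['_'] <+: l.drop m) :
    l.takeWhile (fun c => decide (c ≠ '_')) = l.take m := by
  induction l generalizing m with
  | nil => simp at h2
  | cons c rest ih =>
    cases m with
    | zero =>
      rw [single_prefix_iff] at h2; simp at h2
      simp [List.takeWhile, h2]
    | succ m' =>
      have hc : c ≠ '_' := by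
        intro h; exact h1 0 (Nat.succ_pos _) (by rw [single_prefix_iff]; simp [h])
      simp only [List.takeWhile_cons, List.take_succ_cons]
      rw [if_pos (by simp [hc])]
      rw [ih m' (fun i hi => h1 (i+1) (by omega)) h2]

-- takeWhile = the find/slice expression of B
theorem takeWhile_eq_findSlice (l : List Char) :
    l.takeWhile (fun c => decide (c ≠ '_'))
      = if PySem.Chars.find l ['_'] = -1 then l
        else PySem.Chars.slice l none (some (PySem.Chars.find l ['_'])) := by
  by_cases h : PySem.Chars.find l ['_'] = -1
  · rw [if_pos h]
    have hninf : ¬ ['_'] <:+: l := (PySem.Chars.find_eq_neg_one_iff l ['_']).mp h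
    have hmem : '_' ∉ l := by
      intro hm
      obtain ⟨a, b, rfl⟩ := List.append_of_mem hm
      exact hninf ⟨a, b, by simp⟩
    rw [List.takeWhile_eq_self_iff.mpr]
    intro a ha
    simp
    intro heq
    exact hmem (heq ▸ ha)
  · rw [if_neg h]
    have hpos : 0 ≤ PySem.Chars.find l ['_'] := by
      have := PySem.Chars.neg_one_le_find l ['_']
      omega
    obtain ⟨hp, hlt⟩ := PySem.Chars.find_spec hpos
    simp only [PySem.Chars.slice_eq_listSlice]
    rw [PySem.List.slice_to l hpos]
    exact takeWhile_eq_take l _ hlt hp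

-- ===== VERDICT (by name: the statement is the Claim_ definition above) =====
theorem format_url_spec : Claim_equal_format_url := by
  intro fileurl _
  unfold Spec_format_url format_url format_url_alt
  simp only []
  rw [resetFold_eq_slice, fmtLoop2_eq_takeWhile, List.nil_append, takeWhile_eq_findSlice]
  split <;> rfl
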